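-- pv_equiv track=rewrite | github.com/jiajunzhu0107/LeetCode | String/StringWithout3IdenticalConsecutiveLetters.py | filter_string
-- ===== SOURCE A (Python) =====
-- def filter_string(s: str) -> str:
--     # WRITE YOUR BRILLIANT CODE HERE
--     prev_c = ''
--     cnt = 0
--     res = []
--     for i in range(len(s)):
--         if s[i] == prev_c:
--             cnt += 1
--             if cnt == 3:
--                 cnt -= 1
--                 continue
--         else:
--             prev_c = s[i]
--             cnt = 1
--         res.append(s[i])
--
--
--     return ''.join(res)
-- ===== SOURCE B (Python) =====
-- def filter_string(s: str) -> str: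
--     # Scan maximal runs of equal characters by index; emit at most 2 of each run.
--     res = []
--     i = 0
--     n = len(s)
--     while i < n:
--         j = i
--         while j < n and s[j] == s[i]:
--             j += 1
--         res.append(s[i] * min(2, j - i))
--         i = j
--     return ''.join(res)
-- ===== Notes on version B (the rewrite author's own statement) =====
-- stated objective: alternative
-- what changed: Replaces the per-character prev/cnt state machine with a run-based scan: find each maximal run of equal characters and emit at most two of its character.
import Mathlib
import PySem

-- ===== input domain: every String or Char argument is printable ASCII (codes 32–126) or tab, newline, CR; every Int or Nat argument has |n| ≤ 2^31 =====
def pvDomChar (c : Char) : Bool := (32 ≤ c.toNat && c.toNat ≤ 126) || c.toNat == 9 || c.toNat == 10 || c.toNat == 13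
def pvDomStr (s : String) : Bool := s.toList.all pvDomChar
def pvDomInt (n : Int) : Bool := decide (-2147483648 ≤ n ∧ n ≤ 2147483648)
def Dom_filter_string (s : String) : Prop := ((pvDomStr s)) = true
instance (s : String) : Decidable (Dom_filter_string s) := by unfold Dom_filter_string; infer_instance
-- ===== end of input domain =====

-- B replaces A's per-character prev/cnt state machine by a run-based scan (emit ≤ 2 of each maximal run); same O(n) cost.

-- ===== PORT A =====
-- A's loop: state prev_c (Option Char for the initial '' sentinel) and cnt; same branch order.
def filterLoopA : List Char → Option Char → Nat → List Char
  | [], _, _ => []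
  | c :: rest, prev, cnt =>
    if some c = prev then
      if cnt + 1 = 3 then filterLoopA rest prev 2
      else c :: filterLoopA rest prev (cnt + 1)
    else c :: filterLoopA rest (some c) 1

def filter_string (s : String) : String := String.ofList (filterLoopA s.toList none 0)

-- ===== PORT B =====
-- B's outer loop: take the maximal run at the front (inner scan = takeWhile), emit min 2 (run length)
-- copies of its character, continue after the run.
def filterLoopB : List Char → List Char
  | [] => []
  | c :: rest =>
    List.replicate (min 2 (1 + (rest.takeWhile (· == c)).length)) c
      ++ filterLoopB (rest.dropWhile (· == c))
termination_by l => l.length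
decreasing_by
  simp only [List.length_cons]
  exact Nat.lt_succ_of_le (List.length_dropWhile_le _ _)

def filter_string_alt (s : String) : String := String.ofList (filterLoopB s.toList)

-- ===== PRECONDITION & SPEC =====
def Spec_filter_string (s : String) (out : String) : Prop := out = filter_string_alt s
instance (s : String) (out : String) : Decidable (Spec_filter_string s out) := by unfold Spec_filter_string; infer_instance

-- ===== CLAIM (what is proved, stated in full; the proofs are below) =====
def Claim_equal_filter_string : Prop := ∀ (s : String), Dom_filter_string s → Spec_filter_string s (filter_string s)

-- ===== LEMMAS AND PROOFS =====

-- with cnt = 2, a block of further copies of the same char is skipped entirely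
theorem loopA_saturated (c : Char) : ∀ (k : Nat) (r : List Char),
    filterLoopA (List.replicate k c ++ r) (some c) 2 = filterLoopA r (some c) 2 := by
  intro k
  induction k with
  | zero => intro r; simp
  | succ n ih =>
    intro r
    simp only [List.replicate_succ, List.cons_append, filterLoopA]
    exact ih r

-- a stale prev that does not match the head behaves like the fresh state
theorem loopA_fresh (c : Char) (cnt : Nat) : ∀ (r : List Char),
    (∀ d, r.head? = some d → d ≠ c) → filterLoopA r (some c) cnt = filterLoopA r none 0 := by
  intro r h
  cases r with
  | nil => rfl
  | cons d t =>
    have hd : d ≠ c := h d rfl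
    simp only [filterLoopA]
    rw [if_neg (by simp [hd]), if_neg (by simp)]

theorem dropWhile_head_ne (c : Char) : ∀ (l : List Char),
    ∀ d, (l.dropWhile (· == c)).head? = some d → d ≠ c := by
  intro l
  induction l with
  | nil => intro d hd; simp [List.dropWhile] at hd
  | cons a t ih =>
    intro d hd
    by_cases h : a = c
    · rw [List.dropWhile_cons_of_pos (by simp [h])] at hd
      exact ih d hd
    · rw [List.dropWhile_cons_of_neg (by simp [h])] at hd
      simp at hd
      simpa [← hd] using h

theorem takeWhile_eq_replicate (c : Char) (l : List Char) :
    l.takeWhile (· == c) = List.replicate (l.takeWhile (· == c)).length c := by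
  apply List.eq_replicate_of_mem
  intro b hb
  have := List.mem_takeWhile_imp hb
  simpa using this

theorem loopA_eq_loopB : ∀ (n : Nat) (l : List Char), l.length ≤ n →
    filterLoopA l none 0 = filterLoopB l := by
  intro n
  induction n with
  | zero =>
    intro l hl
    have : l = [] := List.eq_nil_of_length_eq_zero (Nat.le_zero.mp hl)
    subst this; simp [filterLoopA, filterLoopB]
  | succ n ih =>
    intro l hl
    cases l with
    | nil => simp [filterLoopA, filterLoopB]
    | cons c rest =>
      have hk : rest.takeWhile (· == c) = List.replicate (rest.takeWhile (· == c)).length c :=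
        takeWhile_eq_replicate c rest
      have hrest : rest = List.replicate (rest.takeWhile (· == c)).length c
          ++ rest.dropWhile (· == c) := by
        conv_lhs => rw [← List.takeWhile_append_dropWhile (p := (· == c)) (l := rest)]
        rw [← hk]
      have hdroplen : (rest.dropWhile (· == c)).length ≤ n := by
        have h1 := List.length_dropWhile_le (p := (· == c)) (l := rest)
        have h2 : rest.length ≤ n := by simp at hl; omega
        omega
      have hih := ih (rest.dropWhile (· == c)) hdroplen
      have hfresh := loopA_fresh c 2 (rest.dropWhile (· == c)) (dropWhile_head_ne c rest)
      have hfresh1 := loopA_fresh c 1 (rest.dropWhile (· == c)) (dropWhile_head_ne c rest)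
      rw [filterLoopB]
      simp only [filterLoopA, if_neg (by simp : ¬ (some c = none))]
      conv_lhs => rw [hrest]
      generalize (rest.takeWhile (· == c)).length = k at *
      cases k with
      | zero =>
        simp only [List.replicate_zero, List.nil_append, Nat.add_zero]
        rw [hfresh1, hih]
        simp
      | succ m =>
        simp only [List.replicate_succ, List.cons_append, filterLoopA,
          if_neg (by omega : ¬ (1 + 1 = 3))]
        rw [loopA_saturated, hfresh, hih]
        have hmin : min 2 (1 + (m + 1)) = 2 := by omega
        rw [hmin]
        rfl

-- ===== VERDICT (by name: the statement is the Claim_ definition above) =====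
theorem filter_string_spec : Claim_equal_filter_string := by
  intro s _
  unfold Spec_filter_string filter_string filter_string_alt
  rw [loopA_eq_loopB s.toList.length s.toList (le_refl _)]
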